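-- pv_equiv track=rewrite | github.com/developer-hajun/-algorithm | py/숫자카드 구하기.py | solution
-- ===== SOURCE A (Python) =====
-- import math
-- from functools import reduce
--
-- def gcd_multiple(numbers):
--     return reduce(math.gcd, numbers)
--
-- def find_divisors(n):
--     divisors = []
--     for i in range(1, int(n ** 0.5) + 1):
--         if n % i == 0:
--             divisors.append(i)
--             if i != n // i:  # i와 n // i가 다를 경우
--                 divisors.append(n // i)
--     return sorted(divisors)[1:]
--
-- def common_divisors(numbers):
--     gcd_value = gcd_multiple(numbers)  # 모든 수의 최소공약수
--     return find_divisors(gcd_value)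
--
-- def solution(arrayA, arrayB):
--     answer = 0
--     now = common_divisors(arrayA)
--     while now:
--         value = now.pop()
--         ch = True
--         for i in arrayB:
--             if i % value == 0:
--                 ch = False
--                 break
--         if ch:
--             answer = value
--             break
--     now = common_divisors(arrayB)
--     while now:
--         value = now.pop()
--         if value < answer:
--             break
--         ch = True
--         for i in arrayA:
--             if i % value == 0:
--                 ch = False
--                 break
--         if ch:
--             answer = value
--             break
--     return answer
-- ===== SOURCE B (Python) =====
-- import math
-- from functools import reduce
--
--
-- def _prime_factors(n):
--     # trial-division prime factorisation of n (multiset of primes, product = n for n >= 1)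
--     fs = []
--     p = 2
--     while p * p <= n:
--         while n % p == 0:
--             fs.append(p)
--             n //= p
--         p += 1
--     if n > 1:
--         fs.append(n)
--     return fs
--
--
-- def _divisors(fs):
--     # set of all divisors of the product of the prime multiset fs
--     s = {1}
--     for p in fs:
--         s |= {p * d for d in s}
--     return s
--
--
-- def _best(primary, other):
--     g = reduce(math.gcd, primary)
--     best = 0
--     for d in _divisors(_prime_factors(g)):
--         if d > best and all(b % d for b in other):
--             best = d
--     return best
--
--
-- def solution(arrayA, arrayB):
--     return max(_best(arrayA, arrayB), _best(arrayB, arrayA))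
-- ===== Notes on version B (the rewrite author's own statement) =====
-- stated objective: alternative
-- what changed: Replaces A's sqrt-paired divisor enumeration + sort + two duplicated pop/break while-loops by a direction-symmetric helper that trial-division prime-factorises the gcd, generates the divisor set from the prime multiset by repeated set extension, and takes the maximum divisor dividing nothing in the other array; the two directions are combined with max.
import Mathlib
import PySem

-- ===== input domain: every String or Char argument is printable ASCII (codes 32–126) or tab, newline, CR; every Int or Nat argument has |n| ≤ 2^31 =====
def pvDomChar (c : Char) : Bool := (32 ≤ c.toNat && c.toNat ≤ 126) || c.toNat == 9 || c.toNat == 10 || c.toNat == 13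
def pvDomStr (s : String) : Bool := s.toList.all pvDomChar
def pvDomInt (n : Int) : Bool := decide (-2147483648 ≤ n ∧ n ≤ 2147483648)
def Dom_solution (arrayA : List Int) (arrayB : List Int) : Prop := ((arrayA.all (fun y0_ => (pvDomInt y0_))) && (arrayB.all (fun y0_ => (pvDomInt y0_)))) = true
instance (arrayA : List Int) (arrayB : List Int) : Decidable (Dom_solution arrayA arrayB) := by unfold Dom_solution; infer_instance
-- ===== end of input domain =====

-- B replaces A's sqrt-paired divisor enumeration + sort + two duplicated pop/break loops by a
-- direction-symmetric helper: prime-factorise the gcd by trial division, build the divisor set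
-- from the prime multiset, and take the max divisor dividing nothing in the other array
-- (objective: alternative algorithm; similar cost).

-- ===== PORT A =====

-- math.gcd (two arguments; result is nonnegative)
def pyGcd (a b : Int) : Int := (Int.gcd a b : Int)

-- reduce(math.gcd, numbers); reduce raises TypeError on [] — excluded by Pre_
def gcdMultiple : List Int → Int
  | [] => 0
  | x :: xs => xs.foldl pyGcd x

-- int(n ** 0.5) = Nat.sqrt for 0 ≤ n ≤ 2^31 (double sqrt is exact there); sorted(..)[1:] = drop 1
def findDivisors (n : Int) : List Int :=
  let divisors := (PySem.List.pyRange 1 (((Nat.sqrt n.toNat : Nat) : Int) + 1) 1).foldl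
    (fun acc i =>
      if PySem.Int.mod n i = 0 then
        let acc' := acc ++ [i]
        if i ≠ PySem.Int.floordiv n i then acc' ++ [PySem.Int.floordiv n i] else acc'
      else acc) []
  (PySem.List.sorted divisors (fun x => x) false).drop 1

def commonDivisors (numbers : List Int) : List Int := findDivisors (gcdMultiple numbers)

-- for i in arr: if i % value == 0: ch = False; break   (value of ch at loop end)
def chA (arr : List Int) (value : Int) : Bool :=
  match arr with
  | [] => true
  | i :: rest => if PySem.Int.mod i value = 0 then false else chA rest value

-- first while loop: now.pop() pops from the END, so the loop walks now in REVERSE;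
-- applied to (commonDivisors arrayA).reverse below
def loop1A (arrayB : List Int) : List Int → Int
  | [] => 0
  | v :: rest => if chA arrayB v then v else loop1A arrayB rest

-- second while loop, with the 'value < answer' early break
def loop2A (arrayA : List Int) (answer : Int) : List Int → Int
  | [] => answer
  | v :: rest =>
    if v < answer then answer
    else if chA arrayA v then v else loop2A arrayA answer rest

def solution (arrayA : List Int) (arrayB : List Int) : Int :=
  let answer := loop1A arrayB (commonDivisors arrayA).reverse
  loop2A arrayA answer (commonDivisors arrayB).reverse

-- ===== PORT B =====

-- n // p is a smaller nonnegative integer when p ∣ n, 0 < n, 2 ≤ p (termination of pfInner)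
theorem pv_div_lt {n p : Int} (hn : 0 < n) (hp : 2 ≤ p) (hd : PySem.Int.mod n p = 0) :
    0 ≤ PySem.Int.floordiv n p ∧ PySem.Int.floordiv n p < n := by
  have hdvd : p ∣ n := (PySem.Int.mod_eq_zero_iff_dvd n p).mp hd
  rw [PySem.Int.floordiv_eq_ediv_of_pos (by omega)]
  have hq : n / p * p = n := Int.ediv_mul_cancel hdvd
  constructor
  · nlinarith [hq]
  · nlinarith [hq]

-- inner 'while n % p == 0' loop of _prime_factors; the 0 < n ∧ 2 ≤ p guard only makes the
-- recursion total (Python would loop forever on n = 0) — it holds on every reached call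
def pfInner (p n : Int) (acc : List Int) : Int × List Int :=
  if h : 0 < n ∧ 2 ≤ p ∧ PySem.Int.mod n p = 0 then
    pfInner p (PySem.Int.floordiv n p) (acc ++ [p])
  else (n, acc)
termination_by n.toNat
decreasing_by
  have := pv_div_lt h.1 h.2.1 h.2.2
  omega

theorem pfInner_fst_le (p n : Int) (acc : List Int) : (pfInner p n acc).1 ≤ n := by
  fun_induction pfInner p n acc with
  | case1 n acc h ih =>
    have := pv_div_lt h.1 h.2.1 h.2.2
    omega
  | case2 n acc h => exact le_refl n

-- outer 'while p * p <= n' loop of _prime_factors, then the trailing 'if n > 1' append;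
-- the 2 ≤ p conjunct only serves termination (p starts at 2 and only increases)
def pfOuter (p n : Int) (acc : List Int) : List Int :=
  if h : 2 ≤ p ∧ p * p ≤ n then
    pfOuter (p + 1) (pfInner p n acc).1 (pfInner p n acc).2
  else if 1 < n then acc ++ [n] else acc
termination_by (n + 1 - p).toNat
decreasing_by
  have hle := pfInner_fst_le p n acc
  have hpn : p ≤ n := by nlinarith [h.1, h.2]
  omega

def primeFactors (n : Int) : List Int := pfOuter 2 n []

-- s = {1}; for p in fs: s |= {p * d for d in s}
def divisorsOf (fs : List Int) : List Int :=
  fs.foldl (fun s p => PySem.Set.union s (PySem.Set.ofList (s.map (fun d => p * d))))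
    (PySem.Set.ofList [1])

-- for d in divisors: if d > best and all(b % d for b in other): best = d
def bestLoop (other : List Int) (best : Int) : List Int → Int
  | [] => best
  | d :: rest =>
    if decide (best < d) && other.all (fun b => decide (PySem.Int.mod b d ≠ 0)) then
      bestLoop other d rest
    else bestLoop other best rest

def bestB (primary other : List Int) : Int :=
  let g := match primary with | [] => 0 | x :: xs => xs.foldl pyGcd x  -- reduce(math.gcd, primary)
  bestLoop other 0 (divisorsOf (primeFactors g))

def solution_alt (arrayA : List Int) (arrayB : List Int) : Int :=
  max (bestB arrayA arrayB) (bestB arrayB arrayA)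

-- ===== PRECONDITION & SPEC =====

-- helper for Pre_: a one-element array must be nonnegative (reduce returns the element
-- untouched; A then computes (negative) ** 0.5, which is complex, so int() raises TypeError)
def sglOK : List Int → Bool
  | [x] => decide (0 ≤ x)
  | _ => true

-- Pre_ excludes exactly the inputs where A raises: an empty array (reduce of an empty
-- sequence, TypeError) and a one-element negative array ((-n) ** 0.5 is complex, TypeError).
def Pre_solution (arrayA : List Int) (arrayB : List Int) : Prop :=
  arrayA ≠ [] ∧ arrayB ≠ [] ∧ sglOK arrayA = true ∧ sglOK arrayB = true
instance (arrayA : List Int) (arrayB : List Int) : Decidable (Pre_solution arrayA arrayB) := by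
  unfold Pre_solution; infer_instance

def pvWitness_solution : List Int × List Int := ([10, 20, 30], [4, 8, 12])

def Spec_solution (arrayA : List Int) (arrayB : List Int) (out : Int) : Prop := out = solution_alt arrayA arrayB
instance (arrayA : List Int) (arrayB : List Int) (out : Int) : Decidable (Spec_solution arrayA arrayB out) := by unfold Spec_solution; infer_instance

-- ===== CLAIM (what is proved, stated in full; the proofs are below) =====
def Claim_equal_solution : Prop := ∀ (arrayA : List Int) (arrayB : List Int), Dom_solution arrayA arrayB → Pre_solution arrayA arrayB → Spec_solution arrayA arrayB (solution arrayA arrayB)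

-- ===== LEMMAS AND PROOFS =====

-- ---- A side: the raw collected divisor list ----

-- the block of divisors contributed by one i, and the raw collected divisor list
def dblk (g i : Int) : List Int :=
  if PySem.Int.mod g i = 0 then
    i :: (if i ≠ PySem.Int.floordiv g i then [PySem.Int.floordiv g i] else []) else []

def dcoll (g : Int) : List Int :=
  (PySem.List.pyRange 1 (((Nat.sqrt g.toNat : Nat) : Int) + 1) 1).flatMap (dblk g)

theorem collectA_eq (g : Int) :
    ((PySem.List.pyRange 1 (((Nat.sqrt g.toNat : Nat) : Int) + 1) 1).foldl
      (fun acc i =>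
        if PySem.Int.mod g i = 0 then
          let acc' := acc ++ [i]
          if i ≠ PySem.Int.floordiv g i then acc' ++ [PySem.Int.floordiv g i] else acc'
        else acc) []) = dcoll g := by
  rw [PySem.List.foldl_congr_mem _ _ (fun acc i => acc ++ dblk g i) []
    (by
      intro acc x hx
      simp only [dblk]
      split_ifs with h1 h2 <;> simp)]
  rw [PySem.List.foldl_append_eq_flatMap]
  rfl

theorem sq_facts {g : Int} (hg : 1 ≤ g) :
    ((Nat.sqrt g.toNat : Nat) : Int) * ((Nat.sqrt g.toNat : Nat) : Int) ≤ g ∧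
    g < (((Nat.sqrt g.toNat : Nat) : Int) + 1) * (((Nat.sqrt g.toNat : Nat) : Int) + 1) := by
  have h1 : Nat.sqrt g.toNat * Nat.sqrt g.toNat ≤ g.toNat := by
    simpa [pow_two] using Nat.sqrt_le' g.toNat
  have h2 : g.toNat < (Nat.sqrt g.toNat + 1) * (Nat.sqrt g.toNat + 1) := by
    simpa [pow_two] using Nat.lt_succ_sqrt' g.toNat
  have h3 : (g.toNat : Int) = g := Int.toNat_of_nonneg (by omega)
  constructor
  · calc ((Nat.sqrt g.toNat : Nat) : Int) * ((Nat.sqrt g.toNat : Nat) : Int)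
        = ((Nat.sqrt g.toNat * Nat.sqrt g.toNat : Nat) : Int) := by push_cast; ring
    _ ≤ (g.toNat : Int) := by exact_mod_cast h1
    _ = g := h3
  · calc g = (g.toNat : Int) := h3.symm
    _ < (((Nat.sqrt g.toNat + 1) * (Nat.sqrt g.toNat + 1) : Nat) : Int) := by exact_mod_cast h2
    _ = (((Nat.sqrt g.toNat : Nat) : Int) + 1) * (((Nat.sqrt g.toNat : Nat) : Int) + 1) := by push_cast; ring

-- facts about q = g // i for a divisor i of g in the scanned range
theorem q_facts {g i : Int} (hg : 1 ≤ g) (h1 : 1 ≤ i) (h2 : i ≤ ((Nat.sqrt g.toNat : Nat) : Int))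
    (hdvd : i ∣ g) :
    i * PySem.Int.floordiv g i = g ∧ 1 ≤ PySem.Int.floordiv g i ∧ PySem.Int.floordiv g i ∣ g ∧
    (PySem.Int.floordiv g i ≠ i → ((Nat.sqrt g.toNat : Nat) : Int) < PySem.Int.floordiv g i) := by
  have he : PySem.Int.floordiv g i = g / i := PySem.Int.floordiv_eq_ediv_of_pos (by omega)
  have hq : i * PySem.Int.floordiv g i = g := by rw [he]; exact Int.mul_ediv_cancel' hdvd
  have hq1 : 1 ≤ PySem.Int.floordiv g i := by nlinarith
  refine ⟨hq, hq1, ⟨i, by linarith [hq]⟩, ?_⟩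
  intro hne
  by_contra hle
  rw [not_lt] at hle
  have hf := sq_facts hg
  have e1 : i * PySem.Int.floordiv g i ≤ ((Nat.sqrt g.toNat : Nat) : Int) * PySem.Int.floordiv g i :=
    mul_le_mul_of_nonneg_right h2 (by omega)
  have e2 : ((Nat.sqrt g.toNat : Nat) : Int) * PySem.Int.floordiv g i ≤ ((Nat.sqrt g.toNat : Nat) : Int) * ((Nat.sqrt g.toNat : Nat) : Int) :=
    mul_le_mul_of_nonneg_left hle (by omega)
  have e3 : ((Nat.sqrt g.toNat : Nat) : Int) * PySem.Int.floordiv g i = ((Nat.sqrt g.toNat : Nat) : Int) * ((Nat.sqrt g.toNat : Nat) : Int) := by omega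
  have e4 : PySem.Int.floordiv g i = ((Nat.sqrt g.toNat : Nat) : Int) := mul_left_cancel₀ (by omega) e3
  have e5 : i * PySem.Int.floordiv g i = ((Nat.sqrt g.toNat : Nat) : Int) * PySem.Int.floordiv g i := by omega
  have e6 : i = ((Nat.sqrt g.toNat : Nat) : Int) := mul_right_cancel₀ (by omega) e5
  omega

theorem mem_dblk {g i d : Int} (_hg : 1 ≤ g) (_h1 : 1 ≤ i) (_h2 : i ≤ ((Nat.sqrt g.toNat : Nat) : Int))
    (hd : d ∈ dblk g i) :
    i ∣ g ∧ (d = i ∨ (PySem.Int.floordiv g i ≠ i ∧ d = PySem.Int.floordiv g i)) := by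
  unfold dblk at hd
  by_cases hm : PySem.Int.mod g i = 0
  · have hdvd : i ∣ g := (PySem.Int.mod_eq_zero_iff_dvd g i).mp hm
    refine ⟨hdvd, ?_⟩
    rw [if_pos hm] at hd
    rcases List.mem_cons.mp hd with h | h
    · exact Or.inl h
    · by_cases hne : i = PySem.Int.floordiv g i
      · rw [if_neg (fun hh => hh hne)] at h; simp at h
      · rw [if_pos hne] at h
        simp at h
        exact Or.inr ⟨fun hh => hne hh.symm, h⟩
  · rw [if_neg hm] at hd; simp at hd

theorem mem_dcoll {g d : Int} (hg : 1 ≤ g) (hd : d ∈ dcoll g) : d ∣ g ∧ 1 ≤ d := by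
  rcases List.mem_flatMap.mp hd with ⟨i, hir, hib⟩
  rcases PySem.List.mem_pyRange_one.mp hir with ⟨hi1, hi2⟩
  have hi2' : i ≤ ((Nat.sqrt g.toNat : Nat) : Int) := by omega
  rcases mem_dblk hg hi1 hi2' hib with ⟨hdvd, hcase⟩
  rcases q_facts hg hi1 hi2' hdvd with ⟨hq, hq1, hqd, _⟩
  rcases hcase with h | ⟨_, h⟩
  · exact ⟨h ▸ hdvd, by omega⟩
  · exact ⟨h ▸ hqd, by omega⟩

-- completeness: every divisor 1 ≤ d of g appears in the collected list
theorem dcoll_complete {g d : Int} (hg : 1 ≤ g) (hdvd : d ∣ g) (hd : 1 ≤ d) : d ∈ dcoll g := by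
  obtain ⟨c, hc⟩ := hdvd
  have hc1 : 1 ≤ c := by nlinarith
  unfold dcoll
  rw [List.mem_flatMap]
  by_cases hxc : d ≤ c
  · refine ⟨d, ?_, ?_⟩
    · rw [PySem.List.mem_pyRange_one]
      have hdd : d * d ≤ g := by nlinarith
      have hdt : ((d.toNat : Nat) : Int) = d := Int.toNat_of_nonneg (by omega)
      have hgt : ((g.toNat : Nat) : Int) = g := Int.toNat_of_nonneg (by omega)
      have hnat : d.toNat * d.toNat ≤ g.toNat := by
        rw [← Nat.cast_le (α := Int)]
        push_cast
        rw [hdt, hgt]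
        exact hdd
      have : d.toNat ≤ Nat.sqrt g.toNat := Nat.le_sqrt'.mpr (by rw [pow_two]; exact hnat)
      omega
    · unfold dblk
      rw [if_pos ((PySem.Int.mod_eq_zero_iff_dvd g d).mpr ⟨c, hc⟩)]
      exact List.mem_cons_self
  · -- c < d : d shows up as the cofactor of c
    have hcd : c < d := by omega
    have hfd : PySem.Int.floordiv g c = d := by
      rw [PySem.Int.floordiv_eq_ediv_of_pos (by omega), hc, mul_comm]
      exact Int.mul_ediv_cancel_left d (by omega)
    refine ⟨c, ?_, ?_⟩
    · rw [PySem.List.mem_pyRange_one]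
      have hdd : c * c ≤ g := by nlinarith
      have hct : ((c.toNat : Nat) : Int) = c := Int.toNat_of_nonneg (by omega)
      have hgt : ((g.toNat : Nat) : Int) = g := Int.toNat_of_nonneg (by omega)
      have hnat : c.toNat * c.toNat ≤ g.toNat := by
        rw [← Nat.cast_le (α := Int)]
        push_cast
        rw [hct, hgt]
        exact hdd
      have : c.toNat ≤ Nat.sqrt g.toNat := Nat.le_sqrt'.mpr (by rw [pow_two]; exact hnat)
      omega
    · unfold dblk
      rw [if_pos ((PySem.Int.mod_eq_zero_iff_dvd g c).mpr ⟨d, by rw [hc]; ring⟩)]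
      rw [if_pos (by omega : c ≠ PySem.Int.floordiv g c)]
      rw [hfd]
      exact List.mem_cons_of_mem _ List.mem_cons_self

theorem nodup_dcoll {g : Int} (hg : 1 ≤ g) : (dcoll g).Nodup := by
  unfold dcoll
  rw [List.nodup_flatMap]
  constructor
  · intro i hir
    unfold dblk
    split_ifs with h1 h2 <;> simp [*]
  · have hp := PySem.List.pairwise_lt_pyRange_one 1 (((Nat.sqrt g.toNat : Nat) : Int) + 1)
    refine List.Pairwise.imp_of_mem ?_ hp
    intro i j hi hj hij
    rcases PySem.List.mem_pyRange_one.mp hi with ⟨hi1, hi2⟩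
    rcases PySem.List.mem_pyRange_one.mp hj with ⟨hj1, hj2⟩
    intro d hdi hdj
    rcases mem_dblk hg hi1 (by omega) hdi with ⟨hdvdi, hci⟩
    rcases mem_dblk hg hj1 (by omega) hdj with ⟨hdvdj, hcj⟩
    rcases q_facts hg hi1 (by omega) hdvdi with ⟨hqi, hqi1, _, hqis⟩
    rcases q_facts hg hj1 (by omega) hdvdj with ⟨hqj, hqj1, _, hqjs⟩
    rcases hci with h | ⟨hnei, h⟩ <;> rcases hcj with h' | ⟨hnej, h'⟩
    · omega
    · have := hqjs hnej; omega
    · have := hqis hnei; omega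
    · have heq : PySem.Int.floordiv g i = PySem.Int.floordiv g j := by omega
      have : i = j := by
        have h5 : i * PySem.Int.floordiv g j = j * PySem.Int.floordiv g j := by
          rw [← heq, hqi, heq, hqj]
        exact mul_right_cancel₀ (by omega) h5
      omega

theorem one_mem_dcoll {g : Int} (hg : 1 ≤ g) : (1 : Int) ∈ dcoll g := by
  unfold dcoll
  rw [List.mem_flatMap]
  refine ⟨1, ?_, ?_⟩
  · rw [PySem.List.mem_pyRange_one]
    have : 1 ≤ Nat.sqrt g.toNat := by
      have h0 : 0 < g.toNat := by omega
      have := Nat.sqrt_pos.mpr h0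
      omega
    omega
  · unfold dblk
    rw [if_pos ((PySem.Int.mod_eq_zero_iff_dvd g 1).mpr (one_dvd g))]
    exact List.mem_cons_self

-- the reversed A candidate list: exactly the divisors ≥ 2 of g, strictly descending
theorem LA_char (g : Int) (hg : 1 ≤ g) :
    (∀ x, x ∈ (findDivisors g).reverse ↔ x ∣ g ∧ 2 ≤ x) ∧
    ((findDivisors g).reverse.Pairwise (fun a b => b < a)) := by
  have hperm : (PySem.List.sorted (dcoll g) (fun x => x) false).Perm (dcoll g) :=
    PySem.List.sorted_perm _ _ _
  obtain ⟨t, hS⟩ : ∃ t, PySem.List.sorted (dcoll g) (fun x => x) false = 1 :: t := by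
    cases hSe : PySem.List.sorted (dcoll g) (fun x => x) false with
    | nil =>
      have h1 : (1 : Int) ∈ PySem.List.sorted (dcoll g) (fun x => x) false := by
        rw [PySem.List.mem_sorted]; exact one_mem_dcoll hg
      rw [hSe] at h1; simp at h1
    | cons m t =>
      have hm_le : m ≤ 1 := PySem.List.key_head_sorted_le _ _ hSe 1 (one_mem_dcoll hg)
      have hm_mem : m ∈ dcoll g := by
        have hmem : m ∈ PySem.List.sorted (dcoll g) (fun x => x) false := by
          rw [hSe]; exact List.mem_cons_self
        rwa [PySem.List.mem_sorted] at hmem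
      have hm1 : 1 ≤ m := (mem_dcoll hg hm_mem).2
      have hm1e : m = 1 := le_antisymm hm_le hm1
      exact ⟨t, by rw [hm1e]⟩
  have hfd : findDivisors g = t := by
    simp only [findDivisors]
    rw [collectA_eq, hS]
    rfl
  have hnodup : ((1 : Int) :: t).Nodup := hS ▸ hperm.symm.nodup (nodup_dcoll hg)
  have hpair : ((1 : Int) :: t).Pairwise (· ≤ ·) := by
    have := PySem.List.sorted_pairwise (dcoll g) (fun x => x)
    rw [hS] at this
    exact this
  have hstrict : ((1 : Int) :: t).Pairwise (· < ·) :=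
    (hpair.and hnodup).imp (fun h => lt_of_le_of_ne h.1 h.2)
  have hmem1 : ∀ x, x ∈ (1 : Int) :: t ↔ x ∈ dcoll g := by
    intro x
    rw [← hS, PySem.List.mem_sorted]
  rcases List.pairwise_cons.mp hstrict with ⟨hgt1, hpt⟩
  constructor
  · intro x
    rw [hfd, List.mem_reverse]
    constructor
    · intro hx
      have hxd := mem_dcoll hg ((hmem1 x).mp (List.mem_cons_of_mem _ hx))
      have := hgt1 x hx
      exact ⟨hxd.1, by omega⟩
    · rintro ⟨hdvd, h2⟩
      have : x ∈ (1 : Int) :: t := (hmem1 x).mpr (dcoll_complete hg hdvd (by omega))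
      rcases List.mem_cons.mp this with h | h
      · omega
      · exact h
  · rw [hfd]
    exact List.pairwise_reverse.mpr hpt

theorem findDivisors_zero : findDivisors 0 = [] := by decide

-- ---- A side: the loops ----

-- A's inner break loop is an all-scan
theorem chA_eq_all (arr : List Int) (v : Int) :
    chA arr v = arr.all (fun i => decide (PySem.Int.mod i v ≠ 0)) := by
  induction arr with
  | nil => rfl
  | cons i rest ih =>
    unfold chA
    by_cases h : PySem.Int.mod i v = 0 <;> simp [h, ih]

theorem loop1A_cases (arrB : List Int) (L : List Int) :
    loop1A arrB L = 0 ∨ loop1A arrB L ∈ L := by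
  induction L with
  | nil => exact Or.inl rfl
  | cons v rest ih =>
    simp only [loop1A]
    split_ifs with h
    · exact Or.inr List.mem_cons_self
    · rcases ih with h0 | hm
      · exact Or.inl h0
      · exact Or.inr (List.mem_cons_of_mem v hm)

-- on a strictly descending list, A's first loop returns the largest hit (or 0)
theorem loop1A_max (arrB : List Int) (L : List Int) (hpw : L.Pairwise (fun a b => b < a)) :
    (loop1A arrB L = 0 ∧ ∀ x ∈ L, chA arrB x = false) ∨
    (loop1A arrB L ∈ L ∧ chA arrB (loop1A arrB L) = true ∧
      ∀ x ∈ L, chA arrB x = true → x ≤ loop1A arrB L) := by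
  induction L with
  | nil => exact Or.inl ⟨rfl, by simp⟩
  | cons v rest ih =>
    rcases List.pairwise_cons.mp hpw with ⟨hv, hpw'⟩
    by_cases hc : chA arrB v = true
    · right
      simp only [loop1A, if_pos hc]
      refine ⟨List.mem_cons_self, hc, ?_⟩
      intro x hx _
      rcases List.mem_cons.mp hx with h | h
      · omega
      · exact le_of_lt (hv x h)
    · have hc' : chA arrB v = false := by
        cases hB : chA arrB v
        · rfl
        · exact absurd hB hc
      simp only [loop1A, if_neg hc]
      rcases ih hpw' with ⟨h0, hall⟩ | ⟨hm, hp, hb⟩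
      · left
        refine ⟨h0, ?_⟩
        intro x hx
        rcases List.mem_cons.mp hx with h | h
        · rw [h]; exact hc'
        · exact hall x h
      · right
        refine ⟨List.mem_cons_of_mem v hm, hp, ?_⟩
        intro x hx hpx
        rcases List.mem_cons.mp hx with h | h
        · rw [h] at hpx; rw [hpx] at hc'; exact absurd hc' (by simp)
        · exact hb x h hpx

-- the second loop, with its early break, computes the max with the running answer
theorem loop2A_eq_max (arrA : List Int) (L : List Int) (ans : Int) (hans : 0 ≤ ans)
    (hpw : L.Pairwise (fun a b => b < a)) :
    loop2A arrA ans L = max ans (loop1A arrA L) := by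
  induction L with
  | nil => simp only [loop2A, loop1A]; omega
  | cons v rest ih =>
    rcases List.pairwise_cons.mp hpw with ⟨hv, hpw'⟩
    simp only [loop2A, loop1A]
    by_cases hlt : v < ans
    · rw [if_pos hlt]
      have hr : loop1A arrA rest ≤ ans := by
        rcases loop1A_cases arrA rest with h0 | hm
        · omega
        · have := hv _ hm; omega
      split_ifs with hch
      · exact (max_eq_left (by omega)).symm
      · exact (max_eq_left hr).symm
    · rw [if_neg hlt]
      split_ifs with hch
      · exact (max_eq_right (by omega)).symm
      · exact ih hpw'

-- ---- B side: the factorisation ----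

-- primality stated with small divisors only (what trial division certifies)
def IsPr (x : Int) : Prop := 2 ≤ x ∧ ∀ q : Int, 2 ≤ q → q < x → ¬ q ∣ x

theorem pfInner_spec (p n : Int) (acc : List Int) (hp : 2 ≤ p) :
    1 ≤ n → ∃ k : Nat, (pfInner p n acc).2 = acc ++ List.replicate k p ∧
      (pfInner p n acc).1 * p ^ k = n ∧ 1 ≤ (pfInner p n acc).1 ∧ ¬ p ∣ (pfInner p n acc).1 := by
  fun_induction pfInner p n acc with
  | case1 n acc h ih =>
    intro hn
    have hdvd : p ∣ n := (PySem.Int.mod_eq_zero_iff_dvd n p).mp h.2.2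
    have hfd : PySem.Int.floordiv n p = n / p := PySem.Int.floordiv_eq_ediv_of_pos (by omega)
    have hmul : n / p * p = n := Int.ediv_mul_cancel hdvd
    have hn' : 1 ≤ PySem.Int.floordiv n p := by rw [hfd]; nlinarith
    obtain ⟨k, h1, h2, h3, h4⟩ := ih hn'
    refine ⟨k + 1, ?_, ?_, h3, h4⟩
    · rw [h1, List.append_assoc, List.replicate_succ]
      rfl
    · rw [pow_succ, ← mul_assoc, h2, hfd, hmul]
  | case2 n acc h =>
    intro hn
    refine ⟨0, by simp, by simp, hn, ?_⟩
    intro hdvd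
    exact h ⟨by omega, hp, (PySem.Int.mod_eq_zero_iff_dvd n p).mpr hdvd⟩

theorem pfOuter_spec (p n : Int) (acc : List Int) :
    2 ≤ p → 1 ≤ n → (∀ q : Int, 2 ≤ q → q < p → ¬ q ∣ n) →
    ∃ tail, pfOuter p n acc = acc ++ tail ∧ tail.prod = n ∧ ∀ x ∈ tail, IsPr x := by
  fun_induction pfOuter p n acc with
  | case1 p n acc h ih =>
    intro hp hn hsm
    obtain ⟨k, he2, he1, hn', hnd⟩ := pfInner_spec p n acc hp hn
    have hdvdn' : (pfInner p n acc).1 ∣ n := ⟨p ^ k, he1.symm⟩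
    have hsm' : ∀ q : Int, 2 ≤ q → q < p + 1 → ¬ q ∣ (pfInner p n acc).1 := by
      intro q hq1 hq2 hqd
      by_cases hqp : q < p
      · exact hsm q hq1 hqp (hqd.trans hdvdn')
      · have : q = p := by omega
        exact hnd (this ▸ hqd)
    obtain ⟨tail', ht1, ht2, ht3⟩ := ih (by omega) hn' hsm'
    refine ⟨List.replicate k p ++ tail', ?_, ?_, ?_⟩
    · rw [ht1, he2, List.append_assoc]
    · rw [List.prod_append, List.prod_replicate, ht2, mul_comm]
      exact he1
    · intro x hx
      rcases List.mem_append.mp hx with hx | hx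
      · have hxp : x = p := List.eq_of_mem_replicate hx
        -- k ≥ 1 here since replicate k p is nonempty, so p ∣ n
        have hk : 1 ≤ k := by
          rcases Nat.eq_zero_or_pos k with h0 | h0
          · rw [h0] at hx; simp at hx
          · omega
        have hppow : p ^ k = p ^ (k - 1) * p := by
          conv_lhs => rw [show k = (k - 1) + 1 by omega]
          rw [pow_succ]
        have hpdvd : p ∣ n := by
          refine ⟨(pfInner p n acc).1 * p ^ (k - 1), ?_⟩
          conv_lhs => rw [← he1]
          rw [hppow]
          ring
        rw [hxp]
        refine ⟨hp, ?_⟩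
        intro q hq1 hq2 hqd
        exact hsm q hq1 hq2 (hqd.trans hpdvd)
      · exact ht3 x hx
  | case2 p n acc h h1 =>
    intro hp hn hsm
    have hgt : n < p * p := by
      by_contra hc
      exact h ⟨hp, by omega⟩
    refine ⟨[n], rfl, by simp, ?_⟩
    intro x hx
    rw [List.mem_singleton] at hx
    subst hx
    refine ⟨by omega, ?_⟩
    intro q hq1 hq2 hqd
    by_cases hqp : q < p
    · exact hsm q hq1 hqp hqd
    · obtain ⟨c, hc⟩ := hqd
      have hc1 : 1 ≤ c := by nlinarith
      have hc2 : c ≠ 1 := by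
        intro hc2
        rw [hc2, mul_one] at hc
        omega
      have hcp : c < p := by nlinarith
      exact hsm c (by omega) hcp ⟨q, by rw [hc]; ring⟩
  | case3 p n acc h h1 =>
    intro hp hn hsm
    exact ⟨[], by simp, by simp; omega, by simp⟩

theorem IsPr_natPrime {x : Int} (h : IsPr x) : Nat.Prime x.toNat := by
  rcases h with ⟨h2, hnd⟩
  rw [Nat.prime_def_lt']
  refine ⟨by omega, ?_⟩
  intro m hm1 hm2 hmd
  have hx : ((x.toNat : Nat) : Int) = x := Int.toNat_of_nonneg (by omega)
  have hmd' : (m : Int) ∣ x := by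
    rw [← hx]
    exact_mod_cast hmd
  exact hnd m (by exact_mod_cast hm1) (by omega) hmd'

-- one step of the divisor-set extension: s holds the divisors of m, the new set those of p * m
theorem mem_divStep (s : List Int) (p m x : Int) (hp2 : 2 ≤ p) (hpp : Nat.Prime p.toNat)
    (hm : 1 ≤ m) (hs : ∀ y, y ∈ s ↔ 1 ≤ y ∧ y ∣ m) :
    x ∈ PySem.Set.union s (PySem.Set.ofList (s.map (fun d => p * d))) ↔ 1 ≤ x ∧ x ∣ p * m := by
  rw [PySem.Set.mem_union s _ x, PySem.Set.mem_ofList, List.mem_map]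
  constructor
  · rintro (hxs | ⟨d, hd, rfl⟩)
    · rcases (hs x).mp hxs with ⟨h1, h2⟩
      exact ⟨h1, h2.mul_left p⟩
    · rcases (hs d).mp hd with ⟨h1, h2⟩
      exact ⟨by nlinarith, mul_dvd_mul_left p h2⟩
  · rintro ⟨hx1, hxd⟩
    by_cases hpx : p ∣ x
    · obtain ⟨d, rfl⟩ := hpx
      right
      have hd1 : 1 ≤ d := by nlinarith
      have hdm : d ∣ m := (mul_dvd_mul_iff_left (show p ≠ 0 by omega)).mp hxd
      exact ⟨d, (hs d).mpr ⟨hd1, hdm⟩, rfl⟩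
    · left
      apply (hs x).mpr
      refine ⟨hx1, ?_⟩
      have hxt : ((x.toNat : Nat) : Int) = x := Int.toNat_of_nonneg (by omega)
      have hmt : ((m.toNat : Nat) : Int) = m := Int.toNat_of_nonneg (by omega)
      have hpt : ((p.toNat : Nat) : Int) = p := Int.toNat_of_nonneg (by omega)
      have hdn : x.toNat ∣ p.toNat * m.toNat := by
        rw [← Int.natCast_dvd_natCast]
        push_cast
        rw [hxt, hmt, hpt]
        exact hxd
      have hco : Nat.Coprime p.toNat x.toNat := (Nat.Prime.coprime_iff_not_dvd hpp).mpr
        (fun hc => hpx (by rw [← hpt, ← hxt]; exact_mod_cast hc))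
      have hfin : x.toNat ∣ m.toNat := (hco.symm).dvd_of_dvd_mul_left hdn
      rw [← hxt, ← hmt]
      exact_mod_cast hfin

theorem mem_divFold (fs : List Int) : ∀ (s : List Int) (m : Int), 1 ≤ m →
    (∀ p ∈ fs, 2 ≤ p ∧ Nat.Prime p.toNat) →
    (∀ y, y ∈ s ↔ 1 ≤ y ∧ y ∣ m) →
    ∀ x, x ∈ fs.foldl (fun s p => PySem.Set.union s (PySem.Set.ofList (s.map (fun d => p * d)))) s ↔
      1 ≤ x ∧ x ∣ m * fs.prod := by
  induction fs with
  | nil =>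
    intro s m hm _ hs x
    simpa using hs x
  | cons p fs' ih =>
    intro s m hm hfs hs x
    rw [List.foldl_cons]
    have hp := hfs p List.mem_cons_self
    have hstep : ∀ y, y ∈ PySem.Set.union s (PySem.Set.ofList (s.map (fun d => p * d))) ↔
        1 ≤ y ∧ y ∣ p * m := fun y => mem_divStep s p m y hp.1 hp.2 hm hs
    have := ih _ (p * m) (by nlinarith) (fun q hq => hfs q (List.mem_cons_of_mem _ hq)) hstep x
    rw [this, List.prod_cons]
    have he : p * m * fs'.prod = m * (p * fs'.prod) := by ring
    rw [he]

theorem mem_divisorsOf (g : Int) (hg : 1 ≤ g) (x : Int) :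
    x ∈ divisorsOf (primeFactors g) ↔ 1 ≤ x ∧ x ∣ g := by
  obtain ⟨tail, h1, h2, h3⟩ := pfOuter_spec 2 g [] (le_refl 2) hg (by intro q hq1 hq2 _; omega)
  have hpf : primeFactors g = tail := by rw [primeFactors, h1]; rfl
  have hinit : ∀ y : Int, y ∈ PySem.Set.ofList [1] ↔ 1 ≤ y ∧ y ∣ 1 := by
    intro y
    constructor
    · intro hy
      have : y = 1 := by
        have : y ∈ [(1 : Int)] := (PySem.Set.mem_ofList [(1 : Int)] y).mp hy
        simpa using this
      rw [this]
      exact ⟨le_refl 1, dvd_refl 1⟩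
    · rintro ⟨hy1, hyd⟩
      have := Int.le_of_dvd (by omega) hyd
      have hy : y = 1 := by omega
      rw [hy]
      exact (PySem.Set.mem_ofList [(1 : Int)] (1 : Int)).mpr (by simp)
  have := mem_divFold tail (PySem.Set.ofList [1]) 1 (le_refl 1)
    (fun p hp => ⟨(h3 p hp).1, IsPr_natPrime (h3 p hp)⟩) hinit x
  rw [divisorsOf, hpf, this, h2, one_mul]

-- ---- B side: the max scan ----

theorem bestLoop_char (other : List Int) (S : List Int) : ∀ b : Int,
    b ≤ bestLoop other b S ∧
    (bestLoop other b S = b ∨ (bestLoop other b S ∈ S ∧ chA other (bestLoop other b S) = true)) ∧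
    (∀ x ∈ S, chA other x = true → x ≤ bestLoop other b S) := by
  induction S with
  | nil => intro b; exact ⟨le_refl b, Or.inl rfl, by simp⟩
  | cons d rest ih =>
    intro b
    have hall : (other.all (fun b' => decide (PySem.Int.mod b' d ≠ 0))) = chA other d :=
      (chA_eq_all other d).symm
    simp only [bestLoop, hall]
    by_cases hc : b < d ∧ chA other d = true
    · rw [if_pos (by simp [hc.1, hc.2])]
      obtain ⟨ih1, ih2, ih3⟩ := ih d
      refine ⟨by omega, ?_, ?_⟩
      · rcases ih2 with h | h
        · exact Or.inr ⟨by rw [h]; exact List.mem_cons_self, by rw [h]; exact hc.2⟩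
        · exact Or.inr ⟨List.mem_cons_of_mem d h.1, h.2⟩
      · intro x hx hpx
        rcases List.mem_cons.mp hx with h | h
        · omega
        · exact ih3 x h hpx
    · rw [if_neg (by
        intro hcc
        rcases Bool.and_eq_true_iff.mp hcc with ⟨hb1, hb2⟩
        exact hc ⟨of_decide_eq_true hb1, hb2⟩)]
      obtain ⟨ih1, ih2, ih3⟩ := ih b
      refine ⟨ih1, ?_, ?_⟩
      · rcases ih2 with h | h
        · exact Or.inl h
        · exact Or.inr ⟨List.mem_cons_of_mem d h.1, h.2⟩
      · intro x hx hpx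
        rcases List.mem_cons.mp hx with h | h
        · subst h
          have : ¬ b < x := fun hlt => hc ⟨hlt, hpx⟩
          omega
        · exact ih3 x h hpx

-- ---- putting one direction together ----

theorem chA_one_false (other : List Int) (hne : other ≠ []) : chA other 1 = false := by
  cases other with
  | nil => exact absurd rfl hne
  | cons b t =>
    have : PySem.Int.mod b 1 = 0 := by
      rw [PySem.Int.mod_eq_emod_of_pos (by omega)]
      exact Int.emod_one b
    simp [chA]

theorem primeFactors_zero : primeFactors 0 = [] := by
  rw [primeFactors, pfOuter]
  norm_num

theorem dir_eq (g : Int) (hg : 0 ≤ g) (other : List Int) (hne : other ≠ []) :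
    loop1A other (findDivisors g).reverse = bestLoop other 0 (divisorsOf (primeFactors g)) := by
  have h1false := chA_one_false other hne
  rcases eq_or_lt_of_le hg with hg0 | hg1
  · rw [← hg0, findDivisors_zero, primeFactors_zero]
    show (0 : Int) = bestLoop other 0 (divisorsOf [])
    have hd1 : divisorsOf [] = [1] := rfl
    rw [hd1]
    simp only [bestLoop, (chA_eq_all other 1).symm, h1false]
    rw [if_neg (by simp)]
  · have hg' : 1 ≤ g := hg1
    obtain ⟨hmemA, hpwA⟩ := LA_char g hg'
    have hmemS := mem_divisorsOf g hg'
    obtain ⟨hb0, hbcase, hbmax⟩ :=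
      bestLoop_char other (divisorsOf (primeFactors g)) 0
    rcases loop1A_max other _ hpwA with ⟨hA0, hAnone⟩ | ⟨hAmem, hAp, hAmax⟩
    · rw [hA0]
      rcases hbcase with h | ⟨hSm, hSp⟩
      · omega
      · exfalso
        rcases (hmemS _).mp hSm with ⟨h1, hdvd⟩
        rcases eq_or_lt_of_le h1 with he | h2
        · rw [← he, h1false] at hSp
          exact Bool.false_ne_true hSp
        · have hmem : bestLoop other 0 (divisorsOf (primeFactors g)) ∈ (findDivisors g).reverse :=
            (hmemA _).mpr ⟨hdvd, by omega⟩
          rw [hAnone _ hmem] at hSp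
          exact Bool.false_ne_true hSp
    · have hrA := (hmemA _).mp hAmem
      have hrAS : loop1A other (findDivisors g).reverse ∈ divisorsOf (primeFactors g) :=
        (hmemS _).mpr ⟨by omega, hrA.1⟩
      have hle1 := hbmax _ hrAS hAp
      rcases hbcase with h | ⟨hSm, hSp⟩
      · omega
      · rcases (hmemS _).mp hSm with ⟨h1, hdvd⟩
        have hrBne1 : bestLoop other 0 (divisorsOf (primeFactors g)) ≠ 1 := by
          intro he
          rw [he, h1false] at hSp
          exact Bool.false_ne_true hSp
        have hrBL : bestLoop other 0 (divisorsOf (primeFactors g)) ∈ (findDivisors g).reverse :=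
          (hmemA _).mpr ⟨hdvd, by omega⟩
        have hle2 := hAmax _ hrBL hSp
        omega

-- ---- nonnegativity of the gcds, and unfolding bestB ----

theorem foldl_pyGcd_nonneg (l : List Int) (a : Int) (ha : 0 ≤ a) : 0 ≤ l.foldl pyGcd a := by
  induction l generalizing a with
  | nil => exact ha
  | cons x t ih =>
    rw [List.foldl_cons]
    exact ih _ (Int.natCast_nonneg _)

theorem gcdMultiple_nonneg {arr : List Int} (hne : arr ≠ []) (hok : sglOK arr = true) :
    0 ≤ gcdMultiple arr := by
  match arr with
  | [x] =>
    have : (0 ≤ x) = True := by simpa [sglOK] using hok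
    simp only [gcdMultiple, List.foldl_nil]
    simp [this]
  | x :: y :: t =>
    simp only [gcdMultiple, List.foldl_cons]
    exact foldl_pyGcd_nonneg _ _ (Int.natCast_nonneg _)

theorem bestB_eq (primary other : List Int) (hne : primary ≠ []) :
    bestB primary other = bestLoop other 0 (divisorsOf (primeFactors (gcdMultiple primary))) := by
  cases primary with
  | nil => exact absurd rfl hne
  | cons x xs => rfl

-- ===== VERDICT (by name: the statement is the Claim_ definition above) =====
theorem solution_spec : Claim_equal_solution := by
  intro arrayA arrayB hDom hPre
  obtain ⟨hA, hB, hokA, hokB⟩ := hPre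
  have hgA := gcdMultiple_nonneg hA hokA
  have hgB := gcdMultiple_nonneg hB hokB
  unfold Spec_solution solution solution_alt commonDivisors
  have e1 := dir_eq (gcdMultiple arrayA) hgA arrayB hB
  have e2 := dir_eq (gcdMultiple arrayB) hgB arrayA hA
  have hpwB : (findDivisors (gcdMultiple arrayB)).reverse.Pairwise (fun a b => b < a) := by
    rcases eq_or_lt_of_le hgB with h0 | h1
    · rw [← h0, findDivisors_zero]
      exact List.Pairwise.nil
    · exact (LA_char _ h1).2
  have hans : 0 ≤ loop1A arrayB (findDivisors (gcdMultiple arrayA)).reverse := by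
    rw [e1]
    exact (bestLoop_char arrayB (divisorsOf (primeFactors (gcdMultiple arrayA))) 0).1
  rw [loop2A_eq_max arrayA _ _ hans hpwB, e1, e2,
    bestB_eq arrayA arrayB hA, bestB_eq arrayB arrayA hB]
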